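-- pv_equiv track=rewrite | github.com/GPNex/diordna_dliub_gnoos | cc/gen_stub_libs.py | symbol_in_api
-- ===== SOURCE A (Python) =====
-- def get_tag_value(tag):
--     """Returns the value of a key/value tag.
--
--     Raises:
--         ValueError: Tag is not a key/value type tag.
--
--     Returns: Value part of tag as a string.
--     """
--     if '=' not in tag:
--         raise ValueError('Not a key/value tag: ' + tag)
--     return tag.partition('=')[2]
--
-- def symbol_in_api(tags, arch, api):
--     """Returns true if the symbol is present for the given API level."""
--     introduced_tag = None
--     arch_specific = False
--     for tag in tags:
--         # If there is an arch-specific tag, it should override the common one.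
--         if tag.startswith('introduced=') and not arch_specific:
--             introduced_tag = tag
--         elif tag.startswith('introduced-' + arch + '='):
--             introduced_tag = tag
--             arch_specific = True
--         elif tag == 'future':
--             # This symbol is not in any released API level.
--             # TODO(danalbert): These need to be emitted for api == current.
--             # That's not a construct we have yet, so just skip it for now.
--             return False
--
--     if introduced_tag is None:
--         # We found no "introduced" tags, so the symbol has always been
--         # available.
--         return True
--
--     return api >= int(get_tag_value(introduced_tag))
-- ===== SOURCE B (Python) =====
-- def symbol_in_api(tags, arch, api):
--     """Returns true if the symbol is present for the given API level."""
--     if 'future' in tags: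
--         return False
--     arch_tags = [t for t in tags if t.startswith('introduced-' + arch + '=')]
--     if arch_tags:
--         introduced = arch_tags[-1]
--     else:
--         common_tags = [t for t in tags if t.startswith('introduced=')]
--         introduced = common_tags[-1] if common_tags else None
--     if introduced is None:
--         return True
--     return api >= int(introduced.partition('=')[2])
-- ===== Notes on version B (the rewrite author's own statement) =====
-- stated objective: simpler
-- what changed: Replaces A's stateful single pass (introduced_tag/arch_specific mutable state with overwrite-and-precedence logic) by an early 'future' membership test plus two prefix filters taking the last arch-specific, else last common, introduced tag.
import Mathlib
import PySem

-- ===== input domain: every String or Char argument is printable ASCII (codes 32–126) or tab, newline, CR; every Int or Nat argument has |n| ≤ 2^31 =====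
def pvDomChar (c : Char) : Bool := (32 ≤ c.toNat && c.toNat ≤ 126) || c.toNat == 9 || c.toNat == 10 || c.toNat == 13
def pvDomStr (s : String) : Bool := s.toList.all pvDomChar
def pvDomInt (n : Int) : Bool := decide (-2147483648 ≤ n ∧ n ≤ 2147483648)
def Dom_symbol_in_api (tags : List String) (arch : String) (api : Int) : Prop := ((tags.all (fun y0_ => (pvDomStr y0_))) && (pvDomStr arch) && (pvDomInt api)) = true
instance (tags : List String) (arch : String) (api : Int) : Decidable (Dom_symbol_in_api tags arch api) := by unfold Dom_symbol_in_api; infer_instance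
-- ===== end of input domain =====

-- B replaces A's stateful single pass (mutable introduced_tag/arch_specific) by a 'future'
-- membership test plus prefix filters ("last arch-specific, else last common, introduced tag"):
-- a simpler decomposition; same return value wherever Python A returns normally.

-- shared char-level primitive: tag.partition('=')[2] as a list of chars ([] when no '=')
def pvAfterEq : List Char → List Char
  | [] => []
  | c :: cs => if c = '=' then cs else pvAfterEq cs

-- ===== PORT A =====
-- get_tag_value(tag): raises (none) when '=' not in tag, else the part after the first '='
def pvGetTagValue? (tag : String) : Option (List Char) :=
  if PySem.Str.isIn "=" tag then some (pvAfterEq tag.toList) else none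

-- the arch-specific prefix 'introduced-' + arch + '='
def pvArchPre (arch : String) : List Char := "introduced-".toList ++ arch.toList ++ ['=']

-- A's for-loop: state = (introduced_tag, arch_specific); none = the early 'return False'
def pvLoopA (arch : String) : List String → Option String → Bool → Option (Option String)
  | [], it, _ => some it
  | t :: ts, it, asp =>
    if PySem.Chars.startswith t.toList "introduced=".toList && !asp then
      pvLoopA arch ts (some t) asp
    else if PySem.Chars.startswith t.toList (pvArchPre arch) then
      pvLoopA arch ts (some t) true
    else if t = "future" then
      none
    else
      pvLoopA arch ts it asp

def symbol_in_api (tags : List String) (arch : String) (api : Int) : Bool :=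
  match pvLoopA arch tags none false with
  | none => false                      -- the loop's 'return False' on a 'future' tag
  | some none => true                  -- introduced_tag is None
  | some (some tag) =>
    match pvGetTagValue? tag with
    | none => false                    -- Python raises ValueError here (unreachable: tag contains '=')
    | some v =>
      match PySem.Int.ofChars? v with
      | none => false                  -- int() raises ValueError here; excluded by Pre_
      | some n => decide (api ≥ n)

-- ===== PORT B =====
def symbol_in_api_alt (tags : List String) (arch : String) (api : Int) : Bool :=
  if tags.contains "future" then false
  else
    let archTags := tags.filter (fun t => PySem.Chars.startswith t.toList ("introduced-".toList ++ arch.toList ++ "=".toList))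
    let introduced : Option String :=
      match archTags.getLast? with
      | some t => some t
      | none => (tags.filter (fun t => PySem.Chars.startswith t.toList "introduced=".toList)).getLast?
    match introduced with
    | none => true
    | some t =>
      match PySem.Int.ofChars? (pvAfterEq t.toList) with
      | none => false                  -- int() raises ValueError here; excluded by Pre_
      | some n => decide (api ≥ n)

-- ===== PRECONDITION & SPEC =====
-- the governing tag of both programs: last arch-specific introduced tag, else last common one
def pvGovern (tags : List String) (arch : String) : Option String :=
  ((tags.filter (fun t => PySem.Chars.startswith t.toList (pvArchPre arch))).getLast?).or
    ((tags.filter (fun t => PySem.Chars.startswith t.toList "introduced=".toList)).getLast?)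

-- Pre_ excludes exactly the inputs where Python A raises ValueError: no 'future' tag and the
-- governing introduced tag's value (the part after its first '=') is not parseable by int()
-- (both A and B raise there).
def Pre_symbol_in_api (tags : List String) (arch : String) (api : Int) : Prop :=
  "future" ∈ tags ∨
    ((pvGovern tags arch).all (fun t =>
      (PySem.Int.ofChars? (PySem.Chars.slice t.toList (some (PySem.Chars.find t.toList ['='] + 1)) none)).isSome)) = true
instance (tags : List String) (arch : String) (api : Int) : Decidable (Pre_symbol_in_api tags arch api) := by unfold Pre_symbol_in_api; infer_instance

def pvWitness_symbol_in_api : List String × String × Int := (["introduced=9", "introduced-arm=12"], "arm", 10)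

def Spec_symbol_in_api (tags : List String) (arch : String) (api : Int) (out : Bool) : Prop := out = symbol_in_api_alt tags arch api
instance (tags : List String) (arch : String) (api : Int) (out : Bool) : Decidable (Spec_symbol_in_api tags arch api out) := by unfold Spec_symbol_in_api; infer_instance

-- ===== CLAIM (what is proved, stated in full; the proofs are below) =====
def Claim_equal_symbol_in_api : Prop := ∀ (tags : List String) (arch : String) (api : Int), Dom_symbol_in_api tags arch api → Pre_symbol_in_api tags arch api → Spec_symbol_in_api tags arch api (symbol_in_api tags arch api)

-- ===== LEMMAS AND PROOFS =====

-- a tag cannot start with both 'introduced=' and 'introduced-<arch>='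
lemma pv_disjoint (t : String) (arch : String)
    (h : PySem.Chars.startswith t.toList "introduced=".toList = true) :
    PySem.Chars.startswith t.toList (pvArchPre arch) = false := by
  by_contra hne
  have h2 : PySem.Chars.startswith t.toList (pvArchPre arch) = true := by
    cases hp : PySem.Chars.startswith t.toList (pvArchPre arch) <;> simp_all
  rw [PySem.Chars.startswith_iff] at h h2
  obtain ⟨r1, e1⟩ := h
  obtain ⟨r2, e2⟩ := h2
  rw [← e1] at e2
  have hcom : "introduced=".toList = "introduced".toList ++ ['='] := by decide
  have harch : pvArchPre arch = "introduced".toList ++ ['-'] ++ (arch.toList ++ ['=']) := by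
    simp [pvArchPre]
  rw [hcom, harch] at e2
  simp only [List.append_assoc] at e2
  have := List.append_cancel_left e2
  simp at this

lemma pv_future_not_com (asp : Bool) :
    ¬ ((PySem.Chars.startswith "future".toList "introduced=".toList && !asp) = true) := by
  cases asp <;> decide

lemma pv_future_not_arch (arch : String) :
    ¬ (PySem.Chars.startswith "future".toList (pvArchPre arch) = true) := by
  intro h2
  rw [PySem.Chars.startswith_iff] at h2
  have := h2.length_le
  simp [pvArchPre] at this
  omega

lemma pv_mem_cons_future (t : String) (ts : List String) (hf : t ≠ "future") :
    ("future" ∈ t :: ts) ↔ ("future" ∈ ts) := by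
  constructor
  · intro h
    rcases List.mem_cons.mp h with h | h
    · exact absurd h.symm hf
    · exact h
  · exact List.mem_cons_of_mem t

lemma pv_getLast?_cons {α : Type} (t : α) (l : List α) :
    (t :: l).getLast? = l.getLast?.or (some t) := by
  induction l generalizing t with
  | nil => simp
  | cons b l ih => rw [List.getLast?_cons_cons, ih b]; cases l.getLast? <;> simp

-- the loop hits its 'return False' exactly when some tag is 'future'
lemma pvLoopA_none_iff (arch : String) :
    ∀ (ts : List String) (it : Option String) (asp : Bool),
      (pvLoopA arch ts it asp = none ↔ "future" ∈ ts) := by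
  intro ts
  induction ts with
  | nil => intro it asp; simp [pvLoopA]
  | cons t ts ih =>
    intro it asp
    simp only [pvLoopA]
    by_cases hf : t = "future"
    · subst hf
      rw [if_neg (pv_future_not_com asp), if_neg (pv_future_not_arch arch), if_pos rfl]
      simp
    · rw [pv_mem_cons_future t ts hf]
      by_cases hc : (PySem.Chars.startswith t.toList "introduced=".toList && !asp) = true
      · rw [if_pos hc]; exact ih (some t) asp
      · rw [if_neg hc]
        by_cases ha : PySem.Chars.startswith t.toList (pvArchPre arch) = true
        · rw [if_pos ha]; exact ih (some t) true
        · rw [if_neg ha, if_neg hf]; exact ih it asp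

-- characterisation of the loop's final introduced_tag when no 'future' tag occurs
lemma pvLoopA_char (arch : String) :
    ∀ (ts : List String) (it : Option String) (asp : Bool), "future" ∉ ts →
      pvLoopA arch ts it asp = some
        (match (ts.filter (fun t => PySem.Chars.startswith t.toList (pvArchPre arch))).getLast? with
         | some a => some a
         | none =>
           if asp then it
           else ((ts.filter (fun t => PySem.Chars.startswith t.toList "introduced=".toList)).getLast?).or it) := by
  intro ts
  induction ts with
  | nil => intro it asp _; cases asp <;> simp [pvLoopA]
  | cons t ts ih =>
    intro it asp hnf
    have hf : t ≠ "future" := fun h => hnf (h ▸ List.mem_cons_self)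
    have hnf' : "future" ∉ ts := fun h => hnf (List.mem_cons_of_mem t h)
    simp only [pvLoopA]
    by_cases hc : PySem.Chars.startswith t.toList "introduced=".toList = true
    · have hna : PySem.Chars.startswith t.toList (pvArchPre arch) = false := pv_disjoint t arch hc
      cases asp with
      | true =>
        -- arch_specific already set: the common tag is ignored by the loop and irrelevant on the right
        rw [if_neg (show ¬((PySem.Chars.startswith t.toList "introduced=".toList && !true) = true) by
              rw [Bool.not_true, Bool.and_false]; exact Bool.false_ne_true),
            if_neg (by simp [hna]), if_neg hf, ih it true hnf']
        simp only [List.filter_cons, hna, Bool.false_eq_true, if_false]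
        cases hl : (ts.filter (fun t => PySem.Chars.startswith t.toList (pvArchPre arch))).getLast? <;> simp
      | false =>
        rw [if_pos (show (PySem.Chars.startswith t.toList "introduced=".toList && !false) = true by
              rw [hc]; rfl),
            ih (some t) false hnf']
        simp only [List.filter_cons, hc, hna, Bool.false_eq_true, if_false, if_true]
        cases hl : (ts.filter (fun t => PySem.Chars.startswith t.toList (pvArchPre arch))).getLast? with
        | none => rw [pv_getLast?_cons, Option.or_assoc]; simp
        | some a => simp
    · have hc' : PySem.Chars.startswith t.toList "introduced=".toList = false := by
        cases hp : PySem.Chars.startswith t.toList "introduced=".toList <;> simp_all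
      by_cases ha : PySem.Chars.startswith t.toList (pvArchPre arch) = true
      · rw [if_neg (fun h => by rw [hc'] at h; simp at h), if_pos ha, ih (some t) true hnf']
        simp only [List.filter_cons, hc', ha, Bool.false_eq_true, if_false, if_true]
        rw [pv_getLast?_cons]
        cases (ts.filter (fun t => PySem.Chars.startswith t.toList (pvArchPre arch))).getLast? <;> simp
      · have ha' : PySem.Chars.startswith t.toList (pvArchPre arch) = false := by
          cases hp : PySem.Chars.startswith t.toList (pvArchPre arch) <;> simp_all
        rw [if_neg (fun h => by rw [hc'] at h; simp at h), if_neg ha, if_neg hf, ih it asp hnf']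
        simp only [List.filter_cons, hc', ha', Bool.false_eq_true, if_false]

-- a tag starting with a prefix that ends in '=' contains '='
lemma pv_isIn_eq_of_startswith (t : String) (p : List Char) (hp : '=' ∈ p)
    (h : PySem.Chars.startswith t.toList p = true) : PySem.Str.isIn "=" t = true := by
  rw [PySem.Chars.startswith_iff] at h
  rw [PySem.Str.isIn_iff_infix]
  have hm : '=' ∈ t.toList := h.mem hp
  have : ['='] <:+: t.toList := (List.singleton_infix_iff '=' t.toList).mpr hm
  simpa using this

-- ===== VERDICT (by name: the statement is the Claim_ definition above) =====
theorem symbol_in_api_spec : Claim_equal_symbol_in_api := by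
  intro tags arch api _ _
  unfold Spec_symbol_in_api symbol_in_api symbol_in_api_alt
  by_cases hf : "future" ∈ tags
  · rw [(pvLoopA_none_iff arch tags none false).mpr hf]
    simp [hf]
  · have hcont : tags.contains "future" = false := by simp [hf]
    rw [pvLoopA_char arch tags none false hf]
    simp only [hcont, Bool.false_eq_true, if_false]
    have harch : ("introduced-".toList ++ arch.toList ++ "=".toList) = pvArchPre arch := by
      simp [pvArchPre]
    simp only [harch]
    cases hl : (tags.filter (fun t => PySem.Chars.startswith t.toList (pvArchPre arch))).getLast? with
    | some a =>
      have hmem : a ∈ tags.filter (fun t => PySem.Chars.startswith t.toList (pvArchPre arch)) :=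
        List.mem_of_getLast? hl
      have hsw : PySem.Chars.startswith a.toList (pvArchPre arch) = true :=
        (List.mem_filter.mp hmem).2
      have hin : PySem.Str.isIn "=" a = true :=
        pv_isIn_eq_of_startswith a (pvArchPre arch) (by simp [pvArchPre]) hsw
      have hin' : PySem.Chars.isIn ['='] a.toList = true := by simpa using hin
      simp [pvGetTagValue?, hin']
    | none =>
      simp only [hl, Option.or_none]
      cases hl2 : (tags.filter (fun t => PySem.Chars.startswith t.toList "introduced=".toList)).getLast? with
      | none => simp
      | some b =>
        have hmem : b ∈ tags.filter (fun t => PySem.Chars.startswith t.toList "introduced=".toList) :=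
          List.mem_of_getLast? hl2
        have hsw : PySem.Chars.startswith b.toList "introduced=".toList = true :=
          (List.mem_filter.mp hmem).2
        have hin : PySem.Str.isIn "=" b = true :=
          pv_isIn_eq_of_startswith b "introduced=".toList (by decide) hsw
        have hin' : PySem.Chars.isIn ['='] b.toList = true := by simpa using hin
        simp [pvGetTagValue?, hin']
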